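-- pv_equiv track=rewrite | github.com/olion500/AndroidGoogleSheetsToXML | TranslateToXML.py | handle_nested_html
-- ===== SOURCE A (Python) =====
-- def handle_nested_html(content):
--     phase = 0
--     start_tag_start, start_tag_end = 0, 0
--     end_tag_start, end_tag_end = 0, 0
--
--     for idx, ch in enumerate(content):
--         if ch == '<' and phase == 0:
--             start_tag_start = idx
--             phase += 1
--
--         elif ch == '>' and phase == 1:
--             start_tag_end = idx
--             phase += 1
--
--         elif ch == '<' and phase == 2:
--             end_tag_start = idx
--             phase += 1
--
--         elif ch == '>' and phase == 3:
--             end_tag_end = idx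
--             phase += 1
--
--     # if phase is 4, nested tag exist.
--     return phase == 4, start_tag_start, start_tag_end, end_tag_start, end_tag_end
-- ===== SOURCE B (Python) =====
-- def _bisect_right(lst, x):
--     lo, hi = 0, len(lst)
--     while lo < hi:
--         mid = (lo + hi) // 2
--         if lst[mid] <= x:
--             lo = mid + 1
--         else:
--             hi = mid
--     return lo
--
--
-- def _after(lst, pos):
--     j = _bisect_right(lst, pos)
--     return lst[j] if j < len(lst) else -1
--
--
-- def handle_nested_html(content):
--     lt = [i for i, ch in enumerate(content) if ch == '<']
--     gt = [i for i, ch in enumerate(content) if ch == '>']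
--     a = lt[0] if lt else -1
--     if a == -1:
--         return False, 0, 0, 0, 0
--     b = _after(gt, a)
--     if b == -1:
--         return False, a, 0, 0, 0
--     c = _after(lt, b)
--     if c == -1:
--         return False, a, b, 0, 0
--     d = _after(gt, c)
--     if d == -1:
--         return False, a, b, c, 0
--     return True, a, b, c, d
-- ===== Notes on version B (the rewrite author's own statement) =====
-- stated objective: alternative
-- what changed: Replaced the per-character phase state machine with two precomputed sorted index tables of '<' and '>' positions, from which the four delimiter positions are selected by hand-written binary search (bisect_right).
import Mathlib
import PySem

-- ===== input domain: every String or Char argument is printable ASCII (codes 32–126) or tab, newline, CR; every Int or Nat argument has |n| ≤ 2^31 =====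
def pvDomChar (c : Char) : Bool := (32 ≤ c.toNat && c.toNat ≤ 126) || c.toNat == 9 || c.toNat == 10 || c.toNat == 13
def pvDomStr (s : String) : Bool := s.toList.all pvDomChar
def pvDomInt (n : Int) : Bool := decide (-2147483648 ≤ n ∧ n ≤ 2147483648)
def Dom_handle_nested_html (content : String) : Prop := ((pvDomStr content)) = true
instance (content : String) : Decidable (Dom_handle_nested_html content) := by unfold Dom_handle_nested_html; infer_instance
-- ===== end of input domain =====

-- B replaces A's per-character phase state machine by two precomputed index tables ('<' and '>'
-- positions) queried by a hand-written binary search; same results, a different algorithm (alternative).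

-- ===== PORT A =====
def hnhStep (st : Int × Int × Int × Int × Int) (p : Int × Char) : Int × Int × Int × Int × Int :=
  match st, p with
  | (phase, s1, s2, e1, e2), (idx, ch) =>
    if ch = '<' ∧ phase = 0 then (phase + 1, idx, s2, e1, e2)
    else if ch = '>' ∧ phase = 1 then (phase + 1, s1, idx, e1, e2)
    else if ch = '<' ∧ phase = 2 then (phase + 1, s1, s2, idx, e2)
    else if ch = '>' ∧ phase = 3 then (phase + 1, s1, s2, e1, idx)
    else (phase, s1, s2, e1, e2)

def handle_nested_html (content : String) : Bool × Int × Int × Int × Int :=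
  match (PySem.List.enumerate content.toList 0).foldl hnhStep (0, 0, 0, 0, 0) with
  | (phase, s1, s2, e1, e2) => (decide (phase = 4), s1, s2, e1, e2)

-- ===== PORT B =====
-- _bisect_right's while loop as structural recursion on hi - lo; lst[mid] is always in range
-- (lo < hi ≤ len), so List.getD is exact here.
def bsr (lst : List Int) (x : Int) (lo hi : Nat) : Nat :=
  if h : lo < hi then
    let mid := (lo + hi) / 2
    if lst.getD mid 0 ≤ x then bsr lst x (mid + 1) hi
    else bsr lst x lo mid
  else lo
termination_by hi - lo
decreasing_by all_goals omega

-- _after: lst[j] with j < len(lst), in range, so List.getD is exact.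
def afterIdx (lst : List Int) (pos : Int) : Int :=
  let j := bsr lst pos 0 lst.length
  if j < lst.length then lst.getD j 0 else -1

-- the two comprehensions [i for i, ch in enumerate(content) if ch == c]
def idxsOf (l : List Char) (c : Char) : List Int :=
  (PySem.List.enumerate l 0).filterMap (fun p => if p.2 = c then some p.1 else none)

def handle_nested_html_alt (content : String) : Bool × Int × Int × Int × Int :=
  let lt := idxsOf content.toList '<'
  let gt := idxsOf content.toList '>'
  let a := lt.headD (-1)        -- lt[0] if lt else -1
  if a = -1 then (false, 0, 0, 0, 0)
  else
    let b := afterIdx gt a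
    if b = -1 then (false, a, 0, 0, 0)
    else
      let c := afterIdx lt b
      if c = -1 then (false, a, b, 0, 0)
      else
        let d := afterIdx gt c
        if d = -1 then (false, a, b, c, 0)
        else (true, a, b, c, d)

-- ===== PRECONDITION & SPEC =====
def Spec_handle_nested_html (content : String) (out : Bool × Int × Int × Int × Int) : Prop := out = handle_nested_html_alt content
instance (content : String) (out : Bool × Int × Int × Int × Int) : Decidable (Spec_handle_nested_html content out) := by unfold Spec_handle_nested_html; infer_instance

-- ===== CLAIM (what is proved, stated in full; the proofs are below) =====
def Claim_equal_handle_nested_html : Prop := ∀ (content : String), Dom_handle_nested_html content → Spec_handle_nested_html content (handle_nested_html content)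

-- ===== LEMMAS AND PROOFS =====

-- first index of character c in l, proof-side helper
def findc : List Char → Char → Option Nat
  | [], _ => none
  | x :: t, c => if x = c then some 0 else (findc t c).map (· + 1)

-- step lemmas: how hnhStep acts at each phase value
theorem step0 (s1 s2 e1 e2 idx : Int) (ch : Char) :
    hnhStep (0, s1, s2, e1, e2) (idx, ch) =
      if ch = '<' then (1, idx, s2, e1, e2) else (0, s1, s2, e1, e2) := by
  by_cases h : ch = '<' <;> norm_num [hnhStep, h]

theorem step1 (s1 s2 e1 e2 idx : Int) (ch : Char) :
    hnhStep (1, s1, s2, e1, e2) (idx, ch) =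
      if ch = '>' then (2, s1, idx, e1, e2) else (1, s1, s2, e1, e2) := by
  by_cases h : ch = '>' <;> norm_num [hnhStep, h]

theorem step2 (s1 s2 e1 e2 idx : Int) (ch : Char) :
    hnhStep (2, s1, s2, e1, e2) (idx, ch) =
      if ch = '<' then (3, s1, s2, idx, e2) else (2, s1, s2, e1, e2) := by
  by_cases h : ch = '<' <;> norm_num [hnhStep, h]

theorem step3 (s1 s2 e1 e2 idx : Int) (ch : Char) :
    hnhStep (3, s1, s2, e1, e2) (idx, ch) =
      if ch = '>' then (4, s1, s2, e1, idx) else (3, s1, s2, e1, e2) := by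
  by_cases h : ch = '>' <;> norm_num [hnhStep, h]

theorem step4 (s1 s2 e1 e2 idx : Int) (ch : Char) :
    hnhStep (4, s1, s2, e1, e2) (idx, ch) = (4, s1, s2, e1, e2) := by
  norm_num [hnhStep]

theorem L4 (l : List Char) (s a b c d : Int) :
    (PySem.List.enumerate l s).foldl hnhStep (4, a, b, c, d) = (4, a, b, c, d) := by
  induction l generalizing s with
  | nil => simp [PySem.List.enumerate_nil]
  | cons x t ih => simp [PySem.List.enumerate_cons, step4, ih]

theorem L3 (l : List Char) (s a b c d : Int) :
    (PySem.List.enumerate l s).foldl hnhStep (3, a, b, c, d) =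
      (match findc l '>' with
       | none => (3, a, b, c, d)
       | some k => (4, a, b, c, s + (k : Int))) := by
  induction l generalizing s with
  | nil => simp [PySem.List.enumerate_nil, findc]
  | cons x t ih =>
    by_cases hx : x = '>'
    · simp [PySem.List.enumerate_cons, step3, hx, findc, L4]
    · simp only [PySem.List.enumerate_cons, List.foldl_cons, step3, if_neg hx, ih (s + 1),
        findc, Option.map]
      cases findc t '>' with
      | none => simp
      | some k => (simp; all_goals omega)

theorem L2 (l : List Char) (s a b c d : Int) :
    (PySem.List.enumerate l s).foldl hnhStep (2, a, b, c, d) =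
      (match findc l '<' with
       | none => (2, a, b, c, d)
       | some k =>
         match findc (l.drop (k + 1)) '>' with
         | none => (3, a, b, s + (k : Int), d)
         | some m => (4, a, b, s + (k : Int), s + (k : Int) + 1 + (m : Int))) := by
  induction l generalizing s with
  | nil => simp [PySem.List.enumerate_nil, findc]
  | cons x t ih =>
    by_cases hx : x = '<'
    · simp only [PySem.List.enumerate_cons, List.foldl_cons, step2, L3,
        findc, if_pos hx, List.drop_succ_cons, List.drop_zero]
      cases findc t '>' with
      | none => simp
      | some m => simp
    · simp only [PySem.List.enumerate_cons, List.foldl_cons, step2, ih (s + 1),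
        findc, if_neg hx, Option.map]
      cases findc t '<' with
      | none => simp
      | some k =>
        simp only [List.drop_succ_cons]
        cases findc (t.drop (k + 1)) '>' with
        | none => (simp; all_goals omega)
        | some m => (simp; all_goals omega)

theorem L1 (l : List Char) (s a b c d : Int) :
    (PySem.List.enumerate l s).foldl hnhStep (1, a, b, c, d) =
      (match findc l '>' with
       | none => (1, a, b, c, d)
       | some k =>
         match findc (l.drop (k + 1)) '<' with
         | none => (2, a, s + (k : Int), c, d)
         | some m =>
           match findc ((l.drop (k + 1)).drop (m + 1)) '>' with
           | none => (3, a, s + (k : Int), s + (k : Int) + 1 + (m : Int), d)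
           | some p => (4, a, s + (k : Int), s + (k : Int) + 1 + (m : Int),
               s + (k : Int) + 1 + (m : Int) + 1 + (p : Int))) := by
  induction l generalizing s with
  | nil => simp [PySem.List.enumerate_nil, findc]
  | cons x t ih =>
    by_cases hx : x = '>'
    · simp only [PySem.List.enumerate_cons, List.foldl_cons, step1, L2,
        findc, if_pos hx, List.drop_succ_cons, List.drop_zero]
      cases findc t '<' with
      | none => simp
      | some m =>
        simp only []
        cases findc (t.drop (m + 1)) '>' with
        | none => simp
        | some p => simp
    · simp only [PySem.List.enumerate_cons, List.foldl_cons, step1, ih (s + 1),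
        findc, if_neg hx, Option.map]
      cases findc t '>' with
      | none => simp
      | some k =>
        simp only [List.drop_succ_cons]
        cases findc (t.drop (k + 1)) '<' with
        | none => (simp; all_goals omega)
        | some m =>
          simp only []
          cases findc ((t.drop (k + 1)).drop (m + 1)) '>' with
          | none => (simp; all_goals omega)
          | some p => (simp; all_goals omega)

theorem L0 (l : List Char) (s a b c d : Int) :
    (PySem.List.enumerate l s).foldl hnhStep (0, a, b, c, d) =
      (match findc l '<' with
       | none => (0, a, b, c, d)
       | some k =>
         match findc (l.drop (k + 1)) '>' with
         | none => (1, s + (k : Int), b, c, d)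
         | some m =>
           match findc ((l.drop (k + 1)).drop (m + 1)) '<' with
           | none => (2, s + (k : Int), s + (k : Int) + 1 + (m : Int), c, d)
           | some p =>
             match findc (((l.drop (k + 1)).drop (m + 1)).drop (p + 1)) '>' with
             | none => (3, s + (k : Int), s + (k : Int) + 1 + (m : Int),
                 s + (k : Int) + 1 + (m : Int) + 1 + (p : Int), d)
             | some q => (4, s + (k : Int), s + (k : Int) + 1 + (m : Int),
                 s + (k : Int) + 1 + (m : Int) + 1 + (p : Int),
                 s + (k : Int) + 1 + (m : Int) + 1 + (p : Int) + 1 + (q : Int))) := by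
  induction l generalizing s with
  | nil => simp [PySem.List.enumerate_nil, findc]
  | cons x t ih =>
    by_cases hx : x = '<'
    · simp only [PySem.List.enumerate_cons, List.foldl_cons, step0, L1,
        findc, if_pos hx, List.drop_succ_cons, List.drop_zero]
      cases findc t '>' with
      | none => simp
      | some m =>
        simp only []
        cases findc (t.drop (m + 1)) '<' with
        | none => simp
        | some p =>
          simp only []
          cases findc ((t.drop (m + 1)).drop (p + 1)) '>' with
          | none => simp
          | some q => simp
    · simp only [PySem.List.enumerate_cons, List.foldl_cons, step0, ih (s + 1),
        findc, if_neg hx, Option.map]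
      cases findc t '<' with
      | none => simp
      | some k =>
        simp only [List.drop_succ_cons]
        cases findc (t.drop (k + 1)) '>' with
        | none => (simp; all_goals omega)
        | some m =>
          simp only []
          cases findc ((t.drop (k + 1)).drop (m + 1)) '<' with
          | none => (simp; all_goals omega)
          | some p =>
            simp only []
            cases findc (((t.drop (k + 1)).drop (m + 1)).drop (p + 1)) '>' with
            | none => (simp; all_goals omega)
            | some q => (simp; all_goals omega)

-- ===== B-side machinery =====

-- offset-generalised index list
def idxsAux (l : List Char) (c : Char) (s : Int) : List Int :=
  (PySem.List.enumerate l s).filterMap (fun p => if p.2 = c then some p.1 else none)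

theorem idxsOf_eq (l : List Char) (c : Char) : idxsOf l c = idxsAux l c 0 := rfl

theorem idxsAux_nil (c : Char) (s : Int) : idxsAux [] c s = [] := by
  simp [idxsAux, PySem.List.enumerate_nil]

theorem idxsAux_cons (h : Char) (t : List Char) (c : Char) (s : Int) :
    idxsAux (h :: t) c s = if h = c then s :: idxsAux t c (s + 1) else idxsAux t c (s + 1) := by
  simp only [idxsAux, PySem.List.enumerate_cons, List.filterMap_cons]
  split_ifs <;> simp_all

theorem mem_idxsAux_ge (l : List Char) (c : Char) :
    ∀ (s x : Int), x ∈ idxsAux l c s → s ≤ x := by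
  induction l with
  | nil => intro s x hx; simp [idxsAux_nil] at hx
  | cons h t ih =>
    intro s x hx
    rw [idxsAux_cons] at hx
    split_ifs at hx with hc
    · rcases List.mem_cons.mp hx with rfl | hx'
      · exact le_refl x
      · have := ih (s + 1) x hx'; omega
    · have := ih (s + 1) x hx; omega

theorem pw_idxsAux (l : List Char) (c : Char) :
    ∀ s : Int, (idxsAux l c s).Pairwise (· < ·) := by
  induction l with
  | nil => intro s; simp [idxsAux_nil]
  | cons h t ih =>
    intro s
    rw [idxsAux_cons]
    split_ifs
    · exact List.Pairwise.cons
        (fun y hy => by have := mem_idxsAux_ge t c (s + 1) y hy; omega) (ih (s + 1))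
    · exact ih (s + 1)

theorem head_idxsAux (l : List Char) (c : Char) :
    ∀ s : Int, (idxsAux l c s).head? = (findc l c).map (fun (k : Nat) => s + (k : Int)) := by
  induction l with
  | nil => intro s; simp [idxsAux_nil, findc]
  | cons h t ih =>
    intro s
    rw [idxsAux_cons]
    by_cases hc : h = c
    · simp [hc, findc]
    · rw [if_neg hc]
      simp only [findc, if_neg hc, ih (s + 1)]
      cases hf : findc t c with
      | none => simp
      | some k => (simp; omega)

-- first element strictly greater than x (proof-side; for a strictly increasing list it is the minimum such)
def firstAbove : List Int → Int → Option Int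
  | [], _ => none
  | y :: t, x => if x < y then some y else firstAbove t x

theorem FA (l : List Char) (c : Char) :
    ∀ (s x : Int), x < s →
      firstAbove (idxsAux l c s) x = (findc l c).map (fun (k : Nat) => s + (k : Int)) := by
  induction l with
  | nil => intro s x _; simp [idxsAux_nil, findc, firstAbove]
  | cons h t ih =>
    intro s x hx
    rw [idxsAux_cons]
    by_cases hc : h = c
    · simp [hc, firstAbove, if_pos hx, findc]
    · rw [if_neg hc, ih (s + 1) x (by omega)]
      simp only [findc, if_neg hc]
      cases hf : findc t c with
      | none => simp
      | some k => (simp; omega)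

theorem FB (l : List Char) (c : Char) :
    ∀ (s : Int) (n : Nat),
      firstAbove (idxsAux l c s) (s + (n : Int)) =
        (findc (l.drop (n + 1)) c).map (fun (m : Nat) => s + (n : Int) + 1 + (m : Int)) := by
  induction l with
  | nil => intro s n; simp [idxsAux_nil, firstAbove, findc]
  | cons h t ih =>
    intro s n
    have hstep : firstAbove (idxsAux (h :: t) c s) (s + (n : Int)) =
        firstAbove (idxsAux t c (s + 1)) (s + (n : Int)) := by
      rw [idxsAux_cons]; split_ifs with hc
      · simp [firstAbove]
      · rfl
    rw [hstep]
    cases n with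
    | zero =>
      rw [show s + ((0 : Nat) : Int) = s by simp]
      rw [FA t c (s + 1) s (by omega)]
      simp only [List.drop_succ_cons, List.drop_zero]
    | succ n' =>
      rw [show s + ((n' + 1 : Nat) : Int) = (s + 1) + (n' : Int) by push_cast; ring]
      rw [ih (s + 1) n']
      simp only [List.drop_succ_cons]

theorem getD_mono (lst : List Int) (hs : lst.Pairwise (· ≤ ·)) (i j : Nat)
    (hij : i ≤ j) (hj : j < lst.length) : lst.getD i 0 ≤ lst.getD j 0 := by
  rcases Nat.eq_or_lt_of_le hij with rfl | h
  · exact le_refl _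
  · have := (List.pairwise_iff_getElem.mp hs) i j (by omega) hj h
    rw [List.getD_eq_getElem lst 0 (by omega), List.getD_eq_getElem lst 0 hj]
    exact this

theorem bsr_inv (fuel : Nat) : ∀ (lst : List Int) (x : Int) (lo hi : Nat),
    hi - lo ≤ fuel → hi ≤ lst.length → lo ≤ hi →
    lst.Pairwise (· ≤ ·) →
    (∀ i, i < lo → lst.getD i 0 ≤ x) →
    (∀ i, hi ≤ i → i < lst.length → x < lst.getD i 0) →
    (∀ i, i < bsr lst x lo hi → lst.getD i 0 ≤ x) ∧
    (∀ i, bsr lst x lo hi ≤ i → i < lst.length → x < lst.getD i 0) ∧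
    bsr lst x lo hi ≤ lst.length := by
  induction fuel with
  | zero =>
    intro lst x lo hi hf hhi hlo hs hlow hhigh
    rw [bsr, dif_neg (by omega)]
    exact ⟨fun i hi' => hlow i hi', fun i h1 h2 => hhigh i (by omega) h2, by omega⟩
  | succ f ih =>
    intro lst x lo hi hf hhi hlo hs hlow hhigh
    rw [bsr]
    by_cases h : lo < hi
    · rw [dif_pos h]
      simp only []
      by_cases hc : lst.getD ((lo + hi) / 2) 0 ≤ x
      · rw [if_pos hc]
        exact ih lst x ((lo + hi) / 2 + 1) hi (by omega) hhi (by omega) hs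
          (fun i hi' => le_trans (getD_mono lst hs i ((lo + hi) / 2) (by omega) (by omega)) hc)
          hhigh
      · rw [if_neg hc]
        exact ih lst x lo ((lo + hi) / 2) (by omega) (by omega) (by omega) hs hlow
          (fun i h1 h2 => lt_of_lt_of_le (lt_of_not_ge hc) (getD_mono lst hs _ i h1 h2))
    · rw [dif_neg h]
      exact ⟨fun i hi' => hlow i hi', fun i h1 h2 => hhigh i (by omega) h2, by omega⟩

theorem firstAbove_split : ∀ (lst : List Int) (j : Nat) (x : Int),
    (∀ i, i < j → lst.getD i 0 ≤ x) →
    (∀ i, j ≤ i → i < lst.length → x < lst.getD i 0) →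
    firstAbove lst x = lst[j]? := by
  intro lst
  induction lst with
  | nil => intro j x _ _; simp [firstAbove]
  | cons y t ih =>
    intro j x hlow hhigh
    cases j with
    | zero =>
      have hy : x < y := by have := hhigh 0 (by omega) (by simp); simpa using this
      simp [firstAbove, hy]
    | succ j' =>
      have hy : y ≤ x := by have := hlow 0 (by omega); simpa using this
      simp only [firstAbove, if_neg (not_lt.mpr hy)]
      rw [ih j' x (fun i hi' => by have := hlow (i + 1) (by omega); simpa using this)
            (fun i h1 h2 => by
              have := hhigh (i + 1) (by omega) (by simpa using Nat.succ_lt_succ h2)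
              simpa using this)]
      simp

theorem afterIdx_eq (lst : List Int) (x : Int) (hs : lst.Pairwise (· < ·)) :
    afterIdx lst x = match firstAbove lst x with | none => -1 | some y => y := by
  obtain ⟨h1, h2, h3⟩ := bsr_inv lst.length lst x 0 lst.length (by omega) le_rfl (by omega)
    (hs.imp (fun h => le_of_lt h))
    (fun i hi' => absurd hi' (Nat.not_lt_zero i))
    (fun i ha hb => absurd (lt_of_le_of_lt ha hb) (lt_irrefl _))
  rw [firstAbove_split lst (bsr lst x 0 lst.length) x h1 h2]
  simp only [afterIdx]
  by_cases hj : bsr lst x 0 lst.length < lst.length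
  · rw [if_pos hj, List.getElem?_eq_getElem hj, List.getD_eq_getElem lst 0 hj]
  · rw [if_neg hj, List.getElem?_eq_none (by omega)]

-- ===== VERDICT proof =====
theorem handle_nested_html_spec : Claim_equal_handle_nested_html := by
  intro content _
  unfold Spec_handle_nested_html handle_nested_html handle_nested_html_alt
  rw [L0 content.toList 0]
  simp only [idxsOf_eq]
  set l := content.toList with hl
  have pwlt := pw_idxsAux l '<' 0
  have pwgt := pw_idxsAux l '>' 0
  have hhd : (idxsAux l '<' 0).headD (-1) =
      match findc l '<' with | none => -1 | some k => (0 : Int) + (k : Int) := by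
    rw [List.headD_eq_head?_getD, head_idxsAux]
    cases findc l '<' <;> simp
  cases h1 : findc l '<' with
  | none =>
    have hlt0 : idxsAux l '<' 0 = [] :=
      List.head?_eq_none_iff.mp (by rw [head_idxsAux, h1]; rfl)
    simp [hlt0]
  | some k =>
    rw [h1] at hhd
    rw [hhd, if_neg (show ¬ (0 : Int) + (k : Int) = -1 by omega)]
    have hb := afterIdx_eq (idxsAux l '>' 0) ((0 : Int) + (k : Int)) pwgt
    rw [FB l '>' 0 k] at hb
    cases h2 : findc (l.drop (k + 1)) '>' with
    | none =>
      rw [h2] at hb; simp only [Option.map_none] at hb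
      rw [hb]
      simp [h2]
    | some m =>
      rw [h2] at hb; simp only [Option.map_some] at hb
      rw [hb, if_neg (show ¬ (0 : Int) + (k : Int) + 1 + (m : Int) = -1 by omega)]
      have hc := afterIdx_eq (idxsAux l '<' 0) ((0 : Int) + ((k + m + 1 : Nat) : Int)) pwlt
      rw [FB l '<' 0 (k + m + 1)] at hc
      rw [show l.drop (k + m + 1 + 1) = l.drop (k + 1 + (m + 1)) by congr 1; omega] at hc
      rw [show (0 : Int) + (k : Int) + 1 + (m : Int) = (0 : Int) + ((k + m + 1 : Nat) : Int)
        by push_cast; ring]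
      cases h3 : findc (l.drop (k + 1 + (m + 1))) '<' with
      | none =>
        rw [h3] at hc; simp only [Option.map_none] at hc
        rw [hc]
        simp [h2, h3]
        omega
      | some p =>
        rw [h3] at hc; simp only [Option.map_some] at hc
        rw [hc, if_neg (show ¬ (0 : Int) + ((k + m + 1 : Nat) : Int) + 1 + (p : Int) = -1
          by push_cast; omega)]
        have hd := afterIdx_eq (idxsAux l '>' 0) ((0 : Int) + ((k + m + p + 2 : Nat) : Int)) pwgt
        rw [FB l '>' 0 (k + m + p + 2)] at hd
        rw [show l.drop (k + m + p + 2 + 1) = l.drop (k + 1 + (m + 1) + (p + 1))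
          by congr 1; omega] at hd
        rw [show (0 : Int) + ((k + m + 1 : Nat) : Int) + 1 + (p : Int)
            = (0 : Int) + ((k + m + p + 2 : Nat) : Int) by push_cast; ring]
        cases h4 : findc (l.drop (k + 1 + (m + 1) + (p + 1))) '>' with
        | none =>
          rw [h4] at hd; simp only [Option.map_none] at hd
          rw [hd]
          simp [h2, h3, h4]
          omega
        | some q =>
          rw [h4] at hd; simp only [Option.map_some] at hd
          rw [hd, if_neg (show ¬ (0 : Int) + ((k + m + p + 2 : Nat) : Int) + 1 + (q : Int) = -1
            by push_cast; omega)]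
          simp [h2, h3, h4]
          omega
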